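-- pv_equiv track=rewrite | github.com/MhKh78/mhkh-icpc-3544 | initial.py | smsTimer
-- ===== SOURCE A (Python) =====
-- keypad = {
--     1: [' '],
--     2: ['A', 'B', 'C'],
--     3: ['D', 'E', 'F'],
--     4: ['G', 'H', 'I'],
--     5: ['J', 'K', 'L'],
--     6: ['M', 'N', 'O'],
--     7: ['P', 'Q', 'R', 'S'],
--     8: ['T', 'U', 'V'],
--     9: ['W', 'X', 'Y', 'Z'],
-- }
--
-- def findingKey(c):
--     if c == '':
--         return [0, 0]
--     for key in keypad.keys():
--         if c in keypad[key]:
--             tap = keypad[key].index(c) + 1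
--             return [key, tap]
--
-- def smsTimer(p, w, text=''):
--     time = 0
--     temp = 0
--     lastIndex = ''
--     tempIndex = None
--     tapSize = 0
--     if text == '':
--         return time
--
--     for i in range(len(text)):
--         temp = findingKey(text[i])
--         tempIndex = temp[0]
--         tapSize = temp[1]
--         if tempIndex != 1 and tempIndex == lastIndex:
--             time += w
--         lastIndex = tempIndex
--         time += (tapSize * p)
--     return time
-- ===== SOURCE B (Python) =====
-- keypad = {
--     1: [' '],
--     2: ['A', 'B', 'C'],
--     3: ['D', 'E', 'F'],
--     4: ['G', 'H', 'I'],
--     5: ['J', 'K', 'L'],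
--     6: ['M', 'N', 'O'],
--     7: ['P', 'Q', 'R', 'S'],
--     8: ['T', 'U', 'V'],
--     9: ['W', 'X', 'Y', 'Z'],
-- }
--
-- _LOOKUP = {c: (key, i + 1) for key, chars in keypad.items() for i, c in enumerate(chars)}
--
-- def smsTimer(p, w, text=''):
--     if text == '':
--         return 0
--     pairs = [_LOOKUP.get(c) for c in text]
--     taps = 0
--     for _, tap in pairs:  # raises TypeError on characters outside the keypad, like A
--         taps += tap
--     waits = sum(1 for (k1, _), (k2, _) in zip(pairs, pairs[1:]) if k1 == k2 and k1 != 1)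
--     return p * taps + w * waits
-- ===== Notes on version B (the rewrite author's own statement) =====
-- stated objective: alternative
-- what changed: A runs one stateful index loop carrying lastIndex across iterations; B first maps each character to its (key,tap) pair via a precomputed flat dict, then computes p*sum(taps) plus w*(count of adjacent equal non-space keys via zip of the pair list with its tail).
import Mathlib
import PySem

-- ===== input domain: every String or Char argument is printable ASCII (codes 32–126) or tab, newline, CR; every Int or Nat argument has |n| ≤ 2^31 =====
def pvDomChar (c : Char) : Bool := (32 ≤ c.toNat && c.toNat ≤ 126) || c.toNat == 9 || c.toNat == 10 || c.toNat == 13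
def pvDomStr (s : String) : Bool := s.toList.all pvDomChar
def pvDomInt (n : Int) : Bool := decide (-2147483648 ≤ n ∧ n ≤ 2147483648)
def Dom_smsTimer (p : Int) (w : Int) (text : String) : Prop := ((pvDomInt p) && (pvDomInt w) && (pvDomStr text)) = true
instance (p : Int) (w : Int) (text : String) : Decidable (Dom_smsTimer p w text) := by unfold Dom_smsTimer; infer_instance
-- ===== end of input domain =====

-- B replaces A's stateful index loop (carrying lastIndex) by a map to (key,tap) pairs
-- and two aggregations: p * sum of taps + w * count of adjacent equal non-space keys.

-- ===== PORT A =====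
-- the module-level keypad dict, as an association list (insertion order)
def keypadA : List (Int × List Char) :=
  [(1, [' ']), (2, ['A','B','C']), (3, ['D','E','F']), (4, ['G','H','I']),
   (5, ['J','K','L']), (6, ['M','N','O']), (7, ['P','Q','R','S']),
   (8, ['T','U','V']), (9, ['W','X','Y','Z'])]

-- findingKey: the c == '' branch can never fire (text[i] is one char); none = Python's
-- fall-through return None (A then raises TypeError on temp[0]; excluded by Pre_)
def findingKey (c : Char) : Option (Int × Int) :=
  keypadA.findSome? (fun kv =>
    if c ∈ kv.2 then some (kv.1, ((PySem.List.index? kv.2 c).getD 0) + 1) else none)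

def smsTimer (p : Int) (w : Int) (text : String) : Int :=
  if text.toList = [] then 0
  else
    ((PySem.List.pyRange 0 (PySem.Str.len text) 1).foldl
      (fun (st : Int × Option Int) i =>
        let temp := (findingKey (PySem.List.pyGetD text.toList i ' ')).getD (0, 0)
        let tempIndex := temp.1
        let tapSize := temp.2
        let time := if tempIndex ≠ 1 ∧ some tempIndex = st.2 then st.1 + w else st.1
        (time + tapSize * p, some tempIndex))
      (0, none)).1

-- ===== PORT B =====
-- the flat dict {char: (key, tap)} built once at module level
def lookupB : PySem.Dict Char (Int × Int) :=
  PySem.Dict.ofList [(' ',(1,1)),('A',(2,1)),('B',(2,2)),('C',(2,3)),('D',(3,1)),('E',(3,2)),('F',(3,3)),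
   ('G',(4,1)),('H',(4,2)),('I',(4,3)),('J',(5,1)),('K',(5,2)),('L',(5,3)),
   ('M',(6,1)),('N',(6,2)),('O',(6,3)),('P',(7,1)),('Q',(7,2)),('R',(7,3)),('S',(7,4)),
   ('T',(8,1)),('U',(8,2)),('V',(8,3)),('W',(9,1)),('X',(9,2)),('Y',(9,3)),('Z',(9,4))]

def smsTimer_alt (p : Int) (w : Int) (text : String) : Int :=
  if text.toList = [] then 0
  else
    let pairs := text.toList.map (fun c => (PySem.Dict.get? lookupB c).getD (0, 0))
    let taps := (pairs.map (·.2)).sum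
    let waits := (pairs.zip pairs.tail).countP
      (fun qr => qr.1.1 == qr.2.1 && !(qr.1.1 == 1))
    p * taps + w * (waits : Int)

-- ===== PRECONDITION & SPEC =====
def pvValidChars : List Char :=
  [' ','A','B','C','D','E','F','G','H','I','J','K','L','M',
   'N','O','P','Q','R','S','T','U','V','W','X','Y','Z']

-- Pre_ excludes exactly the texts containing a character outside the keypad
-- (lowercase, digits, punctuation): there A's findingKey returns None and A raises TypeError.
def Pre_smsTimer (p : Int) (w : Int) (text : String) : Prop :=
  (text.toList.all (fun c => pvValidChars.contains c)) = true
instance (p : Int) (w : Int) (text : String) : Decidable (Pre_smsTimer p w text) := by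
  unfold Pre_smsTimer; infer_instance

def pvWitness_smsTimer : Int × Int × String := (2, 3, "HI")

def Spec_smsTimer (p : Int) (w : Int) (text : String) (out : Int) : Prop := out = smsTimer_alt p w text
instance (p : Int) (w : Int) (text : String) (out : Int) : Decidable (Spec_smsTimer p w text out) := by unfold Spec_smsTimer; infer_instance

-- ===== CLAIM (what is proved, stated in full; the proofs are below) =====
def Claim_equal_smsTimer : Prop := ∀ (p : Int) (w : Int) (text : String), Dom_smsTimer p w text → Pre_smsTimer p w text → Spec_smsTimer p w text (smsTimer p w text)

-- ===== LEMMAS AND PROOFS =====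

-- the (key, tap) pair B assigns to a character
def pvPair (c : Char) : Int × Int := (PySem.Dict.get? lookupB c).getD (0, 0)

-- on valid characters A's lookup agrees with B's
theorem pvPair_eq (c : Char) (h : c ∈ pvValidChars) :
    (findingKey c).getD (0, 0) = pvPair c := by
  have : pvValidChars.all (fun c => (findingKey c).getD (0, 0) == pvPair c) = true := by decide
  have := (List.all_eq_true.mp this) c h
  exact eq_of_beq this

-- reference cost of the tail of the text, given the previous key
def pvG (p w : Int) : Option Int → List (Int × Int) → Int
  | _, [] => 0
  | prev, q :: ps =>
      (if q.1 ≠ 1 ∧ some q.1 = prev then w else 0) + q.2 * p + pvG p w (some q.1) ps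

theorem pvA_loop (p w : Int) (l : List Char) (h : ∀ c ∈ l, c ∈ pvValidChars)
    (t : Int) (prev : Option Int) :
    (l.foldl
      (fun (st : Int × Option Int) c =>
        let temp := (findingKey c).getD (0, 0)
        let tempIndex := temp.1
        let tapSize := temp.2
        let time := if tempIndex ≠ 1 ∧ some tempIndex = st.2 then st.1 + w else st.1
        (time + tapSize * p, some tempIndex))
      (t, prev)).1 = t + pvG p w prev (l.map pvPair) := by
  induction l generalizing t prev with
  | nil => simp [pvG]
  | cons c l ih =>
      have hc : c ∈ pvValidChars := h c (by simp)
      have hl : ∀ x ∈ l, x ∈ pvValidChars := fun x hx => h x (by simp [hx])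
      simp only [List.foldl_cons, List.map_cons, pvG, pvPair_eq c hc]
      rw [ih hl]
      split_ifs <;> ring

theorem pvG_chain (p w : Int) (ps : List (Int × Int)) (q : Int × Int) :
    pvG p w (some q.1) ps
      = p * (ps.map (·.2)).sum
        + w * (((q :: ps).zip ps).countP
            (fun qr => qr.1.1 == qr.2.1 && !(qr.1.1 == 1)) : Int) := by
  induction ps generalizing q with
  | nil => simp [pvG]
  | cons r rest ih =>
      simp only [pvG, List.zip_cons_cons, List.countP_cons, List.map_cons, List.sum_cons, ih r]
      have hiff : (r.1 ≠ 1 ∧ some r.1 = some q.1) ↔ (q.1 == r.1 && !(q.1 == 1)) = true := by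
        simp only [Option.some_inj, Bool.and_eq_true, beq_iff_eq, Bool.not_eq_true',
          beq_eq_false_iff_ne, ne_eq]
        constructor
        · rintro ⟨h1, h2⟩; exact ⟨h2.symm, h2 ▸ h1⟩
        · rintro ⟨h1, h2⟩; exact ⟨h1 ▸ h2, h1.symm⟩
      by_cases hc : r.1 ≠ 1 ∧ some r.1 = some q.1
      · rw [if_pos hc, if_pos (hiff.mp hc)]; push_cast; ring
      · rw [if_neg hc, if_neg (fun hb => hc (hiff.mpr hb))]; push_cast; ring

theorem pvG_none (p w : Int) (ps : List (Int × Int)) :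
    pvG p w none ps
      = p * (ps.map (·.2)).sum
        + w * ((ps.zip ps.tail).countP
            (fun qr => qr.1.1 == qr.2.1 && !(qr.1.1 == 1)) : Int) := by
  cases ps with
  | nil => simp [pvG]
  | cons q rest =>
      simp only [pvG, List.tail_cons, pvG_chain, List.map_cons, List.sum_cons]
      simp; ring

-- ===== VERDICT (by name: the statement is the Claim_ definition above) =====
theorem smsTimer_spec : Claim_equal_smsTimer := by
  intro p w text _ hpre
  unfold Spec_smsTimer smsTimer smsTimer_alt
  by_cases he : text.toList = []
  · simp [he]
  · simp only [he, if_false]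
    rw [show PySem.Str.len text = (text.toList.length : Int) from by
      simp [PySem.Str.len]]
    rw [PySem.List.foldl_pyRange_zero_pyGetD' text.toList ' '
      (fun (st : Int × Option Int) c =>
        let temp := (findingKey c).getD (0, 0)
        let tempIndex := temp.1
        let tapSize := temp.2
        let time := if tempIndex ≠ 1 ∧ some tempIndex = st.2 then st.1 + w else st.1
        (time + tapSize * p, some tempIndex)) ((0 : Int), (none : Option Int))]
    have hpre' : ∀ c ∈ text.toList, c ∈ pvValidChars := by
      intro c hc
      simpa using (List.all_eq_true.mp hpre) c hc
    rw [pvA_loop p w text.toList hpre' 0 none, pvG_none]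
    simp only [List.map_map, zero_add]
    rfl
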